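-- pv_equiv track=rewrite | github.com/grokeverything/mega-outlook-mcp | src/mega_outlook_mcp/utils/rfc5322.py | _split_msg_ids
-- ===== SOURCE A (Python) =====
-- def _split_msg_ids(value: str) -> list[str]:
--     # Message-IDs are whitespace-separated, each wrapped in angle brackets.
--     ids: list[str] = []
--     buf = ""
--     depth = 0
--     for ch in value:
--         if ch == "<":
--             depth = 1
--             buf = "<"
--         elif ch == ">" and depth:
--             buf += ">"
--             ids.append(buf)
--             buf = ""
--             depth = 0
--         elif depth:
--             buf += ch
--     return ids
-- ===== SOURCE B (Python) =====
-- def _split_msg_ids(value: str) -> list[str]: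
--     # Split on '<' (which always starts a fresh token); in each following
--     # segment the token runs up to the first '>', if any.
--     return [
--         "<" + part[: part.find(">")] + ">"
--         for part in value.split("<")[1:]
--         if ">" in part
--     ]
-- ===== Notes on version B (the rewrite author's own statement) =====
-- stated objective: idiomatic
-- what changed: Replaces the character-by-character state machine (buffer + depth flag) with a split-on-'<' comprehension that emits, for each segment containing '>', the text up to the first '>' wrapped in angle brackets.
import Mathlib
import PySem

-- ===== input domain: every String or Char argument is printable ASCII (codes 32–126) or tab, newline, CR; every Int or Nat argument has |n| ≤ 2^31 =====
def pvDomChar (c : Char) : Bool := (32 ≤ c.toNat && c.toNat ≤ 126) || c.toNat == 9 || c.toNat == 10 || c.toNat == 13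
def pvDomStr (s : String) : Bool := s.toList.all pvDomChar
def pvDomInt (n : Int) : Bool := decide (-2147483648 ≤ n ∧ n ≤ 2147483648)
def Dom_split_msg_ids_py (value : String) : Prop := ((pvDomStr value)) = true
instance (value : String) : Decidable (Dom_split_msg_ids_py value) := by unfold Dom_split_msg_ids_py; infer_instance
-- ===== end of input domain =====

-- B replaces A's character-by-character state machine (buffer + depth flag) by an
-- idiomatic split-on-'<' comprehension (same O(n); a timing run measured B faster).


-- ===== PORT A =====
-- literal port of A's for-loop: state (ids, buf, depth); strings kept as List Char
-- (String.ofList at the very end), buf += ch is buf ++ [ch].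
def splitMsgIdsStepA (st : List (List Char) × List Char × Bool) (ch : Char) :
    List (List Char) × List Char × Bool :=
  if ch = '<' then (st.1, ['<'], true)
  else if ch = '>' ∧ st.2.2 = true then (st.1 ++ [st.2.1 ++ ['>']], [], false)
  else if st.2.2 = true then (st.1, st.2.1 ++ [ch], st.2.2)
  else st

def split_msg_ids_py (value : String) : List String :=
  ((value.toList.foldl splitMsgIdsStepA ([], [], false)).1).map (fun l => String.ofList l)

-- ===== PORT B =====
-- literal port of Source B: value.split("<") is PySem.Chars.splitOn (sep "<" is nonempty),
-- [1:] is drop 1, '">" in part' is Chars.isIn, part[:part.find(">")] is Chars.slice with Chars.find.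
def split_msg_ids_py_alt (value : String) : List String :=
  ((((PySem.Chars.splitOn value.toList ['<']).drop 1).filter
      (fun p => PySem.Chars.isIn ['>'] p)).map
    (fun p => String.ofList
      ('<' :: PySem.Chars.slice p none (some (PySem.Chars.find p ['>'])) ++ ['>'])))

-- ===== PRECONDITION & SPEC =====
def Spec_split_msg_ids_py (value : String) (out : List String) : Prop := out = split_msg_ids_py_alt value
instance (value : String) (out : List String) : Decidable (Spec_split_msg_ids_py value out) := by unfold Spec_split_msg_ids_py; infer_instance

-- ===== CLAIM (what is proved, stated in full; the proofs are below) =====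
def Claim_equal_split_msg_ids_py : Prop := ∀ (value : String), Dom_split_msg_ids_py value → Spec_split_msg_ids_py value (split_msg_ids_py value)

-- ===== LEMMAS AND PROOFS =====

-- spec bridge: F = A's loop outside a token, G buf = inside a token with pending buf
mutual
def msgF : List Char → List (List Char)
  | [] => []
  | c :: t => if c = '<' then msgG t ['<'] else msgF t
def msgG : List Char → List Char → List (List Char)
  | [], _ => []
  | c :: t, buf =>
    if c = '<' then msgG t ['<']
    else if c = '>' then (buf ++ ['>']) :: msgF t
    else msgG t (buf ++ [c])
end

-- split-on-'<' spec: cur is the reversed pending segment (mirrors splitOn.go)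
def msgSplit : List Char → List Char → List (List Char)
  | [], cur => [cur.reverse]
  | c :: t, cur => if c = '<' then cur.reverse :: msgSplit t [] else msgSplit t (c :: cur)

def emitSeg (p : List Char) : Option (List Char) :=
  if '>' ∈ p then some ('<' :: p.takeWhile (· ≠ '>') ++ ['>']) else none

theorem msgSplit_cur (cs cur : List Char) :
    msgSplit cs cur = (cur.reverse ++ (msgSplit cs []).headI) :: (msgSplit cs []).tail := by
  induction cs generalizing cur with
  | nil => simp [msgSplit]
  | cons c t ih =>
    by_cases h : c = '<'
    · simp [msgSplit, h]
    · simp only [msgSplit, if_neg h]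
      rw [ih (c :: cur), ih [c]]
      simp

theorem splitOn_go_eq (sep : List Char) (cs : List Char) :
    ∀ fuel cur acc, cs.length < fuel → sep = ['<'] →
      PySem.Chars.splitOn.go sep fuel cs cur acc = acc.reverse ++ msgSplit cs cur := by
  induction cs with
  | nil =>
    intro fuel cur acc hf hs
    cases fuel with
    | zero => omega
    | succ f => simp [PySem.Chars.splitOn.go, msgSplit]
  | cons c t ih =>
    intro fuel cur acc hf hs
    cases fuel with
    | zero => simp at hf
    | succ f =>
      subst hs
      by_cases h : c = '<'
      · have hp : List.isPrefixOf ['<'] (c :: t) = true := by simp [List.isPrefixOf, h]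
        rw [PySem.Chars.splitOn.go, if_pos hp,
          show List.drop (['<'] : List Char).length (c :: t) = t from rfl]
        simp only [List.length_cons] at hf
        rw [ih f [] (cur.reverse :: acc) (by omega) rfl]
        simp [msgSplit, h]
      · have hp : List.isPrefixOf ['<'] (c :: t) = false := by
          simp [List.isPrefixOf]; exact fun hh => h hh.symm
        rw [PySem.Chars.splitOn.go, if_neg (by simp [hp])]
        simp only [List.length_cons] at hf
        rw [ih f (c :: cur) acc (by omega) rfl]
        simp [msgSplit, h]

theorem splitOn_eq_msgSplit (cs : List Char) :
    PySem.Chars.splitOn cs ['<'] = msgSplit cs [] := by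
  rw [PySem.Chars.splitOn, splitOn_go_eq ['<'] cs (cs.length + 1) [] [] (by omega) rfl]
  simp

-- find.go for the single-char pattern ['>']
theorem find_go_gt (p : List Char) :
    ∀ k : Nat, PySem.Chars.find.go ['>'] p k =
      if '>' ∈ p then ((k + (p.takeWhile (· ≠ '>')).length : Nat) : Int) else -1 := by
  induction p with
  | nil => intro k; simp [PySem.Chars.find.go]
  | cons c t ih =>
    intro k
    by_cases h : c = '>'
    · have hp : List.isPrefixOf ['>'] (c :: t) = true := by simp [List.isPrefixOf, h]
      simp [PySem.Chars.find.go, h]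
    · have hp : List.isPrefixOf ['>'] (c :: t) = false := by
        simp [List.isPrefixOf]; exact fun hh => h hh.symm
      rw [PySem.Chars.find.go]
      simp only [hp, Bool.false_eq_true, if_false]
      rw [ih (k + 1)]
      by_cases hm : '>' ∈ t
      · have htw : (c :: t).takeWhile (· ≠ '>') = c :: t.takeWhile (· ≠ '>') := by
          simp [h]
        simp [hm, h]
        omega
      · simp only [hm, if_false]
        rw [if_neg]
        simp only [List.mem_cons, not_or]
        exact ⟨fun hh => h hh.symm, hm⟩

-- the mapped function of B equals emitSeg's token on parts that pass the filter
theorem b_token_eq (p : List Char) (hm : '>' ∈ p) :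
    '<' :: PySem.Chars.slice p none (some (PySem.Chars.find p ['>'])) ++ ['>'] =
      '<' :: p.takeWhile (· ≠ '>') ++ ['>'] := by
  have hf : PySem.Chars.find p ['>'] = ((p.takeWhile (· ≠ '>')).length : Int) := by
    rw [PySem.Chars.find, find_go_gt p 0]; simp [hm]
  rw [hf]
  simp only [PySem.Chars.slice_eq_listSlice, PySem.List.slice_to_natCast]
  rw [← List.prefix_iff_eq_take.mp (List.takeWhile_prefix _)]

theorem isIn_gt_iff (p : List Char) : PySem.Chars.isIn ['>'] p = true ↔ '>' ∈ p := by
  rw [PySem.Chars.isIn_iff_infix]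
  constructor
  · exact fun h => (List.singleton_sublist.mp h.sublist)
  · intro h
    obtain ⟨s, t, rfl⟩ := List.append_of_mem h
    exact ⟨s, t, by simp⟩

theorem filter_map_eq_filterMap_emitSeg (parts : List (List Char)) :
    ((parts.filter (fun p => PySem.Chars.isIn ['>'] p)).map
        (fun p => String.ofList
          ('<' :: PySem.Chars.slice p none (some (PySem.Chars.find p ['>'])) ++ ['>']))) =
      (parts.filterMap emitSeg).map (fun l => String.ofList l) := by
  induction parts with
  | nil => simp
  | cons p t ih =>
    by_cases hm : '>' ∈ p
    · rw [List.filter_cons_of_pos (by simp [isIn_gt_iff, hm]), List.map_cons, ih]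
      simp only [List.filterMap_cons, emitSeg, if_pos hm, List.map_cons]
      rw [b_token_eq p hm]
    · rw [List.filter_cons_of_neg (by simp [isIn_gt_iff, hm])]
      simp only [List.filterMap_cons, emitSeg, if_neg hm]
      exact ih

theorem takeWhile_append_stop (f : Char → Bool) (y : Char) (b r : List Char)
    (hb : ∀ x ∈ b, f x = true) (hy : f y = false) :
    (b ++ y :: r).takeWhile f = b := by
  induction b with
  | nil => simp [hy]
  | cons x xs ih =>
    rw [List.cons_append, List.takeWhile_cons_of_pos (hb x (by simp)),
      ih (fun z hz => hb z (by simp [hz]))]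

-- F / G against the split view
theorem msgFG_split (cs : List Char) :
    (∀ cur, msgF cs = (msgSplit cs cur).tail.filterMap emitSeg) ∧
    (∀ b, '>' ∉ b → msgG cs ('<' :: b) = (msgSplit cs b.reverse).filterMap emitSeg) := by
  induction cs with
  | nil =>
    refine ⟨fun cur => by simp [msgF, msgSplit], fun b hb => ?_⟩
    simp [msgG, msgSplit, emitSeg, hb]
  | cons c t ih =>
    refine ⟨fun cur => ?_, fun b hb => ?_⟩
    · by_cases h : c = '<'
      · simp only [msgF, msgSplit, if_pos h]
        rw [(ih.2 [] (by simp))]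
        simp
      · simp only [msgF, msgSplit, if_neg h]
        rw [ih.1 (c :: cur)]
    · by_cases h : c = '<'
      · simp only [msgG, msgSplit, if_pos h]
        rw [ih.2 [] (by simp)]
        have hnone : emitSeg b = none := by simp [emitSeg, hb]
        simp [hnone]
      · by_cases h2 : c = '>'
        · simp only [msgG, msgSplit, if_neg h, if_pos h2]
          rw [msgSplit_cur t (c :: b.reverse), ih.1 []]
          have hseg : emitSeg ((c :: b.reverse).reverse ++ (msgSplit t []).headI) =
              some ('<' :: b ++ ['>']) := by
            simp only [List.reverse_cons, List.reverse_reverse, h2]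
            have htw : ((b ++ ['>']) ++ (msgSplit t []).headI).takeWhile (· ≠ '>') = b := by
              rw [List.append_assoc, List.singleton_append,
                takeWhile_append_stop _ '>' b _ ?_ (by simp)]
              intro x hx
              simp only [ne_eq, decide_eq_true_eq]
              exact fun hh => hb (hh ▸ hx)
            rw [emitSeg, if_pos (by simp), htw]
          rw [List.filterMap_cons, hseg]
        · simp only [msgG, msgSplit, if_neg h, if_neg h2]
          have hrev : (b ++ [c]).reverse = c :: b.reverse := by simp
          have hb' : '>' ∉ b ++ [c] := by
            simp only [List.mem_append, List.mem_singleton, not_or]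
            exact ⟨hb, fun hh => h2 hh.symm⟩
          rw [show ('<' :: b ++ [c]) = ('<' :: (b ++ [c])) from by simp, ih.2 (b ++ [c]) hb', hrev]

-- A's fold against F / G
theorem foldA_eq (cs : List Char) :
    (∀ ids buf, (cs.foldl splitMsgIdsStepA (ids, buf, false)).1 = ids ++ msgF cs) ∧
    (∀ ids buf, (cs.foldl splitMsgIdsStepA (ids, buf, true)).1 = ids ++ msgG cs buf) := by
  induction cs with
  | nil => simp [msgF, msgG]
  | cons c t ih =>
    refine ⟨fun ids buf => ?_, fun ids buf => ?_⟩
    · by_cases h : c = '<'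
      · have hs : splitMsgIdsStepA (ids, buf, false) c = (ids, ['<'], true) := by
          simp [splitMsgIdsStepA, h]
        rw [List.foldl_cons, hs, ih.2 ids ['<']]
        simp [msgF, h]
      · have hs : splitMsgIdsStepA (ids, buf, false) c = (ids, buf, false) := by
          simp [splitMsgIdsStepA, h]
        rw [List.foldl_cons, hs, ih.1 ids buf]
        simp [msgF, h]
    · by_cases h : c = '<'
      · have hs : splitMsgIdsStepA (ids, buf, true) c = (ids, ['<'], true) := by
          simp [splitMsgIdsStepA, h]
        rw [List.foldl_cons, hs, ih.2 ids ['<']]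
        simp [msgG, h]
      · by_cases h2 : c = '>'
        · have hs : splitMsgIdsStepA (ids, buf, true) c = (ids ++ [buf ++ ['>']], [], false) := by
            simp [splitMsgIdsStepA, h2]
          rw [List.foldl_cons, hs, ih.1 (ids ++ [buf ++ ['>']]) []]
          simp [msgG, h2]
        · have hs : splitMsgIdsStepA (ids, buf, true) c = (ids, buf ++ [c], true) := by
            simp [splitMsgIdsStepA, h, h2]
          rw [List.foldl_cons, hs, ih.2 ids (buf ++ [c])]
          simp [msgG, h, h2]

-- ===== VERDICT (by name: the statement is the Claim_ definition above) =====
theorem split_msg_ids_py_spec : Claim_equal_split_msg_ids_py := by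
  intro value _
  unfold Spec_split_msg_ids_py split_msg_ids_py split_msg_ids_py_alt
  rw [(foldA_eq value.toList).1 [] [], splitOn_eq_msgSplit, filter_map_eq_filterMap_emitSeg,
    (msgFG_split value.toList).1 []]
  simp [List.drop_one]
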